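-- pv_equiv track=rewrite | github.com/microsoft/azure-devops-python-samples | src/http_logging.py | _trim_headers
-- ===== SOURCE A (Python) =====
-- def _trim_headers(headers):
--     sensitive_headers = [
--         "X-VSS-PerfData",
--         "X-TFS-Session",
--         "X-VSS-E2EID",
--         "X-VSS-Agent",
--         "Authorization",
--         "X-TFS-ProcessId",
--         "X-VSS-UserData",
--         "ActivityId",
--         "P3P",
--         "X-Powered-By",
--         "Cookie",
--     ]
--
--     cleaned_headers = headers.copy()
--
--     for sensitive_header in sensitive_headers:
--         try:
--             del cleaned_headers[sensitive_header]
--         except KeyError: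
--             pass
--
--     return dict(cleaned_headers)
-- ===== SOURCE B (Python) =====
-- _SENSITIVE_HEADERS = frozenset((
--     "X-VSS-PerfData",
--     "X-TFS-Session",
--     "X-VSS-E2EID",
--     "X-VSS-Agent",
--     "Authorization",
--     "X-TFS-ProcessId",
--     "X-VSS-UserData",
--     "ActivityId",
--     "P3P",
--     "X-Powered-By",
--     "Cookie",
-- ))
--
--
-- def _trim_headers(headers):
--     return {key: value for key, value in headers.items()
--             if key not in _SENSITIVE_HEADERS}
-- ===== Notes on version B (the rewrite author's own statement) =====
-- stated objective: simpler
-- what changed: B builds the result in one dict-comprehension pass over headers.items(), testing keys against a frozenset blacklist, instead of copying the dict and iterating the blacklist deleting each key under try/except KeyError.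
import Mathlib
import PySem

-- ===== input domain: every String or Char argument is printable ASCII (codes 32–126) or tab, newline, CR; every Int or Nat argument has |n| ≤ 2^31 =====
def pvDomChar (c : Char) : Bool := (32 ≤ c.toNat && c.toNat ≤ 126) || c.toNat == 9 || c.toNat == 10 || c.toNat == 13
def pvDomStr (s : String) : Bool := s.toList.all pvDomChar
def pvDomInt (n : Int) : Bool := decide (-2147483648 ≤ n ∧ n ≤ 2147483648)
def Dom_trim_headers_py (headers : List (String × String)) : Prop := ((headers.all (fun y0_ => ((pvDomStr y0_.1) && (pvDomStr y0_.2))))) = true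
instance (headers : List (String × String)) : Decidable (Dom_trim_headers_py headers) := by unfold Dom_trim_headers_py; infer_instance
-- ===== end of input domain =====

-- B replaces A's copy-then-delete-each-blacklisted-key loop (with try/except KeyError)
-- by a single filtering pass over headers.items() against a frozenset; simpler, same result.


-- ===== PORT A =====
-- A's local list `sensitive_headers`
def sensitiveHeadersList : List String :=
  ["X-VSS-PerfData", "X-TFS-Session", "X-VSS-E2EID", "X-VSS-Agent",
   "Authorization", "X-TFS-ProcessId", "X-VSS-UserData", "ActivityId",
   "P3P", "X-Powered-By", "Cookie"]

-- cleaned = headers.copy(); for k in sensitive: try del cleaned[k] except KeyError: pass; return dict(cleaned)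
-- (del on a missing key raises KeyError, which A swallows; Dict.erase is a no-op there, exact)
def trim_headers_py (headers : List (String × String)) : List (String × String) :=
  let cleaned := PySem.Dict.ofList headers
  (sensitiveHeadersList.foldl (fun d k => d.erase k) cleaned).items

-- ===== PORT B =====
-- the frozenset _SENSITIVE_HEADERS
def sensitiveHeadersSet : PySem.Set String := PySem.Set.ofList sensitiveHeadersList

-- {k: v for k, v in headers.items() if k not in _SENSITIVE_HEADERS}
def trim_headers_py_alt (headers : List (String × String)) : List (String × String) :=
  (PySem.Dict.ofList headers).items.filter
    (fun p => !(PySem.Set.contains sensitiveHeadersSet p.1))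

-- ===== PRECONDITION & SPEC =====
def Spec_trim_headers_py (headers : List (String × String)) (out : List (String × String)) : Prop := out = trim_headers_py_alt headers
instance (headers : List (String × String)) (out : List (String × String)) : Decidable (Spec_trim_headers_py headers out) := by unfold Spec_trim_headers_py; infer_instance

-- ===== CLAIM (what is proved, stated in full; the proofs are below) =====
def Claim_equal_trim_headers_py : Prop := ∀ (headers : List (String × String)), Dom_trim_headers_py headers → Spec_trim_headers_py headers (trim_headers_py headers)

-- ===== LEMMAS AND PROOFS =====

-- deleting each key of ks in turn from a dict filters its items by "key not in ks"
theorem foldl_erase_items (ks : List String) (l : List (String × String)) :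
    ((ks.foldl (fun (d : PySem.Dict String String) k => d.erase k) ⟨l⟩).items)
      = l.filter (fun p => !ks.contains p.1) := by
  induction ks generalizing l with
  | nil => simp
  | cons k ks ih =>
    rw [List.foldl_cons,
      show (PySem.Dict.mk l).erase k = PySem.Dict.mk (l.filter (fun p => !p.1 == k)) from rfl,
      ih, List.filter_filter]
    apply List.filter_congr
    intro p _
    simp [Bool.not_or, Bool.and_comm, BEq.comm, eq_comm, Bool.beq_eq_decide_eq]

-- ===== VERDICT (by name: the statement is the Claim_ definition above) =====
theorem trim_headers_py_spec : Claim_equal_trim_headers_py := by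
  intro headers _
  show _ = _
  unfold trim_headers_py trim_headers_py_alt
  obtain ⟨l⟩ := PySem.Dict.ofList headers
  rw [foldl_erase_items]
  apply List.filter_congr
  intro p _
  have hset : sensitiveHeadersSet = sensitiveHeadersList := by
    unfold sensitiveHeadersSet
    apply PySem.Set.ofList_eq_self_of_nodup
    decide
  rw [PySem.Set.contains_eq_listContains, hset]
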